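-- pv_equiv track=rewrite | github.com/Emvista/DWIE-FR | preprocessing/preprocessing.py | clean_spaces
-- ===== SOURCE A (Python) =====
-- SENTENCE_NER_END_CHAR = [". O", '" O', "? O", "! O"]
--
-- def clean_spaces(data: list) -> list:
--     """Remove unnecessary tokens
--
--     Args:
--         data (list[str]): Flair dataset
--
--     Returns:
--         list[str]: Cleaned Flair dataset
--     """
--     cleaned_data = []
--     for i in range(0, len(data) - 1):
--         if not data[i] == data[i + 1] == "":
--             cleaned_data.append(data[i])
--             if (not data[i] in SENTENCE_NER_END_CHAR) and data[i + 1] == "":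
--                 cleaned_data.append(". O")
--     cleaned_data.append(data[-1])
--     return cleaned_data
-- ===== SOURCE B (Python) =====
-- SENTENCE_NER_END_CHAR = [". O", '" O', "? O", "! O"]
--
-- def clean_spaces(data: list) -> list:
--     """Remove unnecessary tokens (two-phase re-implementation).
--
--     Phase 1 collapses each run of consecutive empty tokens to its last one;
--     phase 2 walks consecutive pairs of the collapsed list, emitting each token
--     and a ". O" sentence-end marker before each empty token when needed.
--     """
--     collapsed = []
--     for i, tok in enumerate(data):
--         if tok == "" and i + 1 < len(data) and data[i + 1] == "":
--             continue
--         collapsed.append(tok)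
--     out = []
--     for x, y in zip(collapsed, collapsed[1:]):
--         out.append(x)
--         if x not in SENTENCE_NER_END_CHAR and y == "":
--             out.append(". O")
--     out.append(collapsed[-1])  # IndexError on empty input, like A's data[-1]
--     return out
-- ===== Notes on version B (the rewrite author's own statement) =====
-- stated objective: alternative
-- what changed: Single indexed loop with skip-and-mark logic is replaced by a two-phase pipeline: first collapse each run of empty tokens to its last one, then walk consecutive pairs of the collapsed list emitting tokens and sentence-end markers.
-- outside the precondition, e.g. on clean_spaces([]): A raises IndexError, B raises IndexError
import Mathlib
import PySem

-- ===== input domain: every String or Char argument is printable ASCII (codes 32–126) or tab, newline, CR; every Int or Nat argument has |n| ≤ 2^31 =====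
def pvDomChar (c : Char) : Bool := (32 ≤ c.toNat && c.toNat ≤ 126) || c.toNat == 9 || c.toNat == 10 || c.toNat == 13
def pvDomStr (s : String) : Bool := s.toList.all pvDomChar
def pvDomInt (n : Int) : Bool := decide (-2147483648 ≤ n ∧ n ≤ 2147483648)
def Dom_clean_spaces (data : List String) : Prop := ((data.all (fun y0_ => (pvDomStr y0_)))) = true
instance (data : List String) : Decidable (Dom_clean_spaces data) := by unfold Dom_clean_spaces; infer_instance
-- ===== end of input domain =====

-- B changes the decomposition (collapse empty runs, then emit over consecutive pairs) instead of A's single indexed loop; same cost.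

def SENTENCE_NER_END_CHAR : List String := [". O", "\" O", "? O", "! O"]

-- ===== PORT A =====
def clean_spaces (data : List String) : List String :=
  let cleaned_data :=
    (PySem.List.pyRange 0 ((data.length : Int) - 1) 1).foldl
      (fun acc i =>
        if ¬ (PySem.List.pyGetD data i "" = PySem.List.pyGetD data (i + 1) "" ∧
               PySem.List.pyGetD data (i + 1) "" = "") then
          let acc := acc ++ [PySem.List.pyGetD data i ""]
          if ¬ (PySem.List.pyGetD data i "" ∈ SENTENCE_NER_END_CHAR) ∧
             PySem.List.pyGetD data (i + 1) "" = "" then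
            acc ++ [". O"]
          else acc
        else acc) []
  cleaned_data ++ [PySem.List.pyGetD data (-1) ""]

-- ===== PORT B =====
-- Phase 1: drop each empty token immediately followed by another empty token.
def pvCollapse : List String → List String
  | [] => []
  | [x] => [x]
  | x :: y :: rest =>
      if x = "" ∧ y = "" then pvCollapse (y :: rest)
      else x :: pvCollapse (y :: rest)

-- Phase 2: emit each token of a consecutive pair plus the marker, then the last token.
def pvEmit : List String → List String
  | [] => []
  | [x] => [x]
  | x :: y :: rest =>
      (if ¬ (x ∈ SENTENCE_NER_END_CHAR) ∧ y = "" then [x, ". O"] else [x]) ++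
        pvEmit (y :: rest)

def clean_spaces_alt (data : List String) : List String :=
  pvEmit (pvCollapse data)

-- ===== PRECONDITION & SPEC =====
-- Pre_ excludes only the empty list, on which A raises IndexError at data[-1].
def Pre_clean_spaces (data : List String) : Prop := data ≠ []
instance (data : List String) : Decidable (Pre_clean_spaces data) := by
  unfold Pre_clean_spaces; infer_instance
def pvWitness_clean_spaces : List String := ["Hello O", "", "world O", ". O", ""]
def Spec_clean_spaces (data : List String) (out : List String) : Prop := out = clean_spaces_alt data
instance (data : List String) (out : List String) : Decidable (Spec_clean_spaces data out) := by unfold Spec_clean_spaces; infer_instance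

-- ===== CLAIM (what is proved, stated in full; the proofs are below) =====
def Claim_equal_clean_spaces : Prop := ∀ (data : List String), Dom_clean_spaces data → Pre_clean_spaces data → Spec_clean_spaces data (clean_spaces data)

-- ===== LEMMAS AND PROOFS =====

-- A's loop body on one pair of adjacent tokens.
def pvStepA (acc : List String) (x y : String) : List String :=
  if ¬ (x = y ∧ y = "") then
    let acc := acc ++ [x]
    if ¬ (x ∈ SENTENCE_NER_END_CHAR) ∧ y = "" then acc ++ [". O"] else acc
  else acc

-- A's loop as structural recursion over the list.
def pvLoopA : List String → List String → List String
  | acc, x :: y :: rest => pvLoopA (pvStepA acc x y) (y :: rest)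
  | acc, _ => acc

theorem pvNatFold (data : List String) (acc : List String) :
    (List.range (data.length - 1)).foldl
      (fun acc k => pvStepA acc (data.getD k "") (data.getD (k + 1) "")) acc
      = pvLoopA acc data := by
  induction data generalizing acc with
  | nil => simp [pvLoopA]
  | cons x t ih =>
    cases t with
    | nil => simp [pvLoopA]
    | cons y rest =>
      have hlen : (x :: y :: rest).length - 1 = (y :: rest).length - 1 + 1 := by
        simp
      rw [hlen, List.range_succ_eq_map, List.foldl_cons, List.foldl_map]
      simp only [List.getD_cons_zero, List.getD_cons_succ]
      exact ih (pvStepA acc x y)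

theorem pvFoldA (data : List String) :
    (PySem.List.pyRange 0 ((data.length : Int) - 1) 1).foldl
      (fun acc i =>
        pvStepA acc (PySem.List.pyGetD data i "") (PySem.List.pyGetD data (i + 1) "")) []
      = pvLoopA [] data := by
  rw [PySem.List.pyRange_one, List.foldl_map]
  have h1 : ((data.length : Int) - 1 - 0).toNat = data.length - 1 := by omega
  have hfun : (fun (acc : List String) (k : Nat) =>
      pvStepA acc (PySem.List.pyGetD data ((0 : Int) + (k : Int)) "")
        (PySem.List.pyGetD data ((0 : Int) + (k : Int) + 1) "")) =
      fun acc k => pvStepA acc (data.getD k "") (data.getD (k + 1) "") := by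
    funext acc k
    have hk : (0 : Int) + (k : Int) = ((k : Nat) : Int) := by ring
    rw [hk]
    have hk1 : ((k : Nat) : Int) + 1 = ((k + 1 : Nat) : Int) := by push_cast; ring
    rw [hk1, PySem.List.pyGetD_natCast, PySem.List.pyGetD_natCast]
  rw [h1, hfun, pvNatFold data []]

theorem pvStepA_append (a b : List String) (x y : String) :
    pvStepA (a ++ b) x y = a ++ pvStepA b x y := by
  unfold pvStepA; split_ifs <;> simp

theorem pvLoopA_append (a b : List String) (l : List String) :
    pvLoopA (a ++ b) l = a ++ pvLoopA b l := by
  induction l generalizing b with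
  | nil => simp [pvLoopA]
  | cons x t ih =>
    cases t with
    | nil => simp [pvLoopA]
    | cons y rest =>
      show pvLoopA (pvStepA (a ++ b) x y) (y :: rest) = _
      rw [pvStepA_append, ih (pvStepA b x y)]
      rfl

theorem pvLoopA_acc (acc : List String) (l : List String) :
    pvLoopA acc l = acc ++ pvLoopA [] l := by
  have := pvLoopA_append acc [] l
  simpa using this

theorem pvHead?_collapse (l : List String) : (pvCollapse l).head? = l.head? := by
  induction l with
  | nil => rfl
  | cons x t ih =>
    cases t with
    | nil => rfl
    | cons y rest =>
      show (if x = "" ∧ y = "" then pvCollapse (y :: rest)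
            else x :: pvCollapse (y :: rest)).head? = _
      split_ifs with h
      · rw [ih]; simp [h.1, h.2]
      · rfl

theorem pvMain (l : List String) (h : l ≠ []) :
    pvLoopA [] l ++ [l.getLast h] = pvEmit (pvCollapse l) := by
  induction l with
  | nil => exact absurd rfl h
  | cons x t ih =>
    cases t with
    | nil => simp [pvLoopA, pvCollapse, pvEmit]
    | cons y rest =>
      have hne : (y :: rest) ≠ [] := by simp
      have hlast : (x :: y :: rest).getLast h = (y :: rest).getLast hne :=
        List.getLast_cons hne
      show pvLoopA (pvStepA [] x y) (y :: rest) ++ _ = pvEmit (pvCollapse (x :: y :: rest))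
      rw [pvLoopA_acc, hlast, List.append_assoc, ih hne]
      by_cases hxy : x = "" ∧ y = ""
      · have : pvStepA [] x y = [] := by simp [pvStepA, hxy]
        rw [this]
        show [] ++ _ = pvEmit (pvCollapse (x :: y :: rest))
        simp only [List.nil_append]
        have : pvCollapse (x :: y :: rest) = pvCollapse (y :: rest) := by
          simp [pvCollapse, hxy]
        rw [this]
      · have hc : pvCollapse (x :: y :: rest) = x :: pvCollapse (y :: rest) := by
          simp [pvCollapse, hxy]
        have hhead : (pvCollapse (y :: rest)).head? = some y := by
          rw [pvHead?_collapse]; rfl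
        obtain ⟨tl, htl⟩ : ∃ tl, pvCollapse (y :: rest) = y :: tl := by
          cases hcy : pvCollapse (y :: rest) with
          | nil => rw [hcy] at hhead; simp at hhead
          | cons z zs =>
            rw [hcy] at hhead
            simp only [List.head?_cons, Option.some.injEq] at hhead
            exact ⟨zs, by rw [hhead]⟩
        rw [hc, htl]
        show pvStepA [] x y ++ pvEmit (y :: tl) = pvEmit (x :: y :: tl)
        have hxy' : ¬ (x = y ∧ y = "") := fun hp => hxy ⟨hp.1.trans hp.2, hp.2⟩
        have hstep : pvStepA [] x y =
            (if ¬ (x ∈ SENTENCE_NER_END_CHAR) ∧ y = "" then [x, ". O"] else [x]) := by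
          simp only [pvStepA, if_pos hxy', List.nil_append]
          split_ifs <;> rfl
        rw [hstep]
        rfl

-- ===== VERDICT (by name: the statement is the Claim_ definition above) =====
theorem clean_spaces_spec : Claim_equal_clean_spaces := by
  intro data _ hpre
  show clean_spaces data = clean_spaces_alt data
  calc clean_spaces data
      = pvLoopA [] data ++ [PySem.List.pyGetD data (-1) ""] :=
        congrArg (fun c => c ++ [PySem.List.pyGetD data (-1) ""]) (pvFoldA data)
    _ = pvLoopA [] data ++ [data.getLast hpre] := by
        have hne0 : data ≠ [] := hpre
        have hg : PySem.List.pyGetD data (-1) "" = data.getLast hne0 :=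
          PySem.List.pyGetD_neg_one data "" hne0
        rw [hg]
    _ = pvEmit (pvCollapse data) := pvMain data hpre
    _ = clean_spaces_alt data := rfl
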